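-- pv_equiv track=rewrite | github.com/Chavez0296/python | unitTwosessionTwo.py | is_authentic_collection
-- ===== SOURCE A (Python) =====
-- def is_authentic_collection(art_pieces):
--
--     table = {}
--     for i in art_pieces:
--         if i not in table:
--             table[i] = 0
--         table[i] += 1
--
--     if table.get(len(art_pieces)-1,0) != 2:
--         return False
--
--     for item in range(1,len(art_pieces)-1):
--         if table.get(item,0) != 1:
--             return False
--
--     return True
--     pass
-- ===== SOURCE B (Python) =====
-- def is_authentic_collection(art_pieces):
--     n = len(art_pieces)
--     return sorted(art_pieces) == list(range(1, n - 1)) + [n - 1, n - 1]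
-- ===== Notes on version B (the rewrite author's own statement) =====
-- stated objective: simpler
-- what changed: Replaces A's frequency-dictionary plus two count-check passes with a single sort-and-compare against the canonical expected list [1..n-2, n-1, n-1].
import Mathlib
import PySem

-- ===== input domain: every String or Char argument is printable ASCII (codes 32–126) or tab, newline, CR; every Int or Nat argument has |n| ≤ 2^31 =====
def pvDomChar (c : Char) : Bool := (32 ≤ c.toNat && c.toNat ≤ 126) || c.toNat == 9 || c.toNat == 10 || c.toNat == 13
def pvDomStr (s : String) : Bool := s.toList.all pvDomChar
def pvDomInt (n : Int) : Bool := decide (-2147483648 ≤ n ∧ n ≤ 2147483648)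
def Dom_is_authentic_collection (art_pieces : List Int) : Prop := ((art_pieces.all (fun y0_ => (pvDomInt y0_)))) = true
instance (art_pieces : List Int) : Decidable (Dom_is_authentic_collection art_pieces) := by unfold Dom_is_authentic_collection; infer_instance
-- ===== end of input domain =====

-- B replaces A's frequency-dictionary-and-count-checks strategy with a single
-- sort-and-compare against the expected pattern [1, …, n-2, n-1, n-1] (objective: simpler).

-- ===== PORT A =====
-- the body of A's counting loop: 'if i not in table: table[i] = 0; table[i] += 1'
def pvStepA (t : PySem.Dict Int Int) (i : Int) : PySem.Dict Int Int :=
  (if t.contains i = false then t.insert i 0 else t).modify i 0 (· + 1)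

def is_authentic_collection (art_pieces : List Int) : Bool :=
  let table := art_pieces.foldl pvStepA PySem.Dict.empty
  let n : Int := art_pieces.length
  if table.getD (n - 1) 0 ≠ 2 then false
  else (PySem.List.pyRange 1 (n - 1) 1).all (fun item => table.getD item 0 == 1)

-- ===== PORT B =====
def is_authentic_collection_alt (art_pieces : List Int) : Bool :=
  let n : Int := art_pieces.length
  decide (PySem.List.sorted art_pieces (fun x => x) false
            = PySem.List.pyRange 1 (n - 1) 1 ++ [n - 1, n - 1])

-- ===== PRECONDITION & SPEC =====
def Spec_is_authentic_collection (art_pieces : List Int) (out : Bool) : Prop := out = is_authentic_collection_alt art_pieces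
instance (art_pieces : List Int) (out : Bool) : Decidable (Spec_is_authentic_collection art_pieces out) := by unfold Spec_is_authentic_collection; infer_instance

-- ===== CLAIM (what is proved, stated in full; the proofs are below) =====
def Claim_equal_is_authentic_collection : Prop := ∀ (art_pieces : List Int), Dom_is_authentic_collection art_pieces → Spec_is_authentic_collection art_pieces (is_authentic_collection art_pieces)

-- ===== LEMMAS AND PROOFS =====

-- A's table is a counter: looking it up gives the multiplicity in the input list
lemma getD_foldl_pvStepA (l : List Int) (d : PySem.Dict Int Int) (v : Int) :
    (l.foldl pvStepA d).getD v 0 = d.getD v 0 + (l.count v : Int) := by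
  induction l generalizing d with
  | nil => simp
  | cons i l ih =>
    have hstep : (pvStepA d i).getD v 0 = d.getD v 0 + (if v = i then 1 else 0) := by
      unfold pvStepA
      by_cases hvi : v = i
      · subst hvi
        cases hc : d.contains v with
        | false =>
          simp [PySem.Dict.getD_modify_self, PySem.Dict.getD_insert_self,
            PySem.Dict.getD_of_not_contains d 0 hc]
        | true => simp [PySem.Dict.getD_modify_self]
      · cases hc : d.contains i with
        | false =>
          rw [if_pos (by simp), PySem.Dict.getD_modify_of_ne _ 0 _ hvi,
            PySem.Dict.getD_insert_of_ne _ 0 0 hvi, if_neg hvi]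
          ring
        | true =>
          rw [if_neg (by simp), PySem.Dict.getD_modify_of_ne _ 0 _ hvi, if_neg hvi]
          ring
    simp only [List.foldl_cons, ih, hstep, List.count_cons, beq_iff_eq]
    push_cast
    split_ifs with h1 h2 <;> omega

lemma tableA_count (xs : List Int) (v : Int) :
    (xs.foldl pvStepA PySem.Dict.empty).getD v 0 = (xs.count v : Int) := by
  simpa using getD_foldl_pvStepA xs PySem.Dict.empty v

-- A returns true iff n-1 occurs twice and every k in [1, n-2] occurs once
lemma A_iff (xs : List Int) :
    is_authentic_collection xs = true ↔
      ((xs.count ((xs.length : Int) - 1) : Int) = 2 ∧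
        ∀ k : Int, 1 ≤ k → k < (xs.length : Int) - 1 → (xs.count k : Int) = 1) := by
  simp only [is_authentic_collection, tableA_count]
  by_cases h2 : (xs.count ((xs.length : Int) - 1) : Int) = 2
  · simp [h2, List.all_eq_true, PySem.List.mem_pyRange_one]
  · simp [h2]


def pvExpected (n : Int) : List Int := PySem.List.pyRange 1 (n - 1) 1 ++ [n - 1, n - 1]

lemma count_pvExpected (n v : Int) :
    (pvExpected n).count v =
      (if 1 ≤ v ∧ v < n - 1 then 1 else 0) + (if v = n - 1 then 2 else 0) := by
  unfold pvExpected
  rw [List.count_append]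
  congr 1
  · by_cases h : 1 ≤ v ∧ v < n - 1
    · rw [if_pos h]
      exact List.count_eq_one_of_mem (PySem.List.nodup_pyRange_one 1 (n - 1))
        ((PySem.List.mem_pyRange_one).2 h)
    · rw [if_neg h]
      exact List.count_eq_zero_of_not_mem (fun hm => h ((PySem.List.mem_pyRange_one).1 hm))
  · by_cases h : v = n - 1 <;> simp [h, Ne.symm]

lemma B_iff (xs : List Int) :
    is_authentic_collection_alt xs = true ↔ xs.Perm (pvExpected (xs.length : Int)) := by
  simp only [is_authentic_collection_alt, decide_eq_true_eq]
  constructor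
  · intro h
    have hp := (PySem.List.sorted_perm xs (fun x => x) false).symm
    rw [h] at hp
    exact hp.trans (by unfold pvExpected; exact List.Perm.refl _)
  · intro h
    show PySem.List.sorted xs (fun x => x) false = _
    have hpair : List.Pairwise (fun a b => a ≤ b)
        (PySem.List.pyRange 1 ((xs.length : Int) - 1) 1 ++
          [(xs.length : Int) - 1, (xs.length : Int) - 1]) := by
      rw [List.pairwise_append]
      refine ⟨(PySem.List.pairwise_lt_pyRange_one 1 _).imp (fun h => le_of_lt h), by simp, ?_⟩
      intro a ha b hb
      have := (PySem.List.mem_pyRange_one).1 ha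
      simp at hb
      omega
    exact PySem.List.sorted_id_eq_of_perm_of_pairwise xs _ (by unfold pvExpected at h; exact h.symm) hpair

-- the multiset characterization: xs matches the pattern iff the counts are right
lemma perm_iff_counts (xs : List Int) :
    xs.Perm (pvExpected (xs.length : Int)) ↔
      ((xs.count ((xs.length : Int) - 1) : Int) = 2 ∧
        ∀ k : Int, 1 ≤ k → k < (xs.length : Int) - 1 → (xs.count k : Int) = 1) := by
  set n : Int := (xs.length : Int) with hn
  constructor
  · intro h
    constructor
    · have := h.count_eq (n - 1)
      rw [count_pvExpected] at this
      have hnot : ¬ (1 ≤ n - 1 ∧ n - 1 < n - 1) := by omega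
      rw [if_neg hnot, if_pos rfl] at this
      omega
    · intro k h1 hk
      have := h.count_eq k
      rw [count_pvExpected, if_pos ⟨h1, hk⟩, if_neg (by omega)] at this
      omega
  · rintro ⟨h2, h1⟩
    have hcle : xs.count (n - 1) ≤ xs.length := List.count_le_length
    have hn2 : 2 ≤ xs.length := by omega
    have hlen : (pvExpected n).length = xs.length := by
      unfold pvExpected
      rw [List.length_append, PySem.List.length_pyRange_one]
      simp only [List.length_cons, List.length_nil]
      omega
    have hsub : List.Subperm (pvExpected n) xs := by
      rw [List.subperm_ext_iff]
      intro x hx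
      rw [count_pvExpected]
      unfold pvExpected at hx
      rcases List.mem_append.1 hx with hx | hx
      · have hb := (PySem.List.mem_pyRange_one).1 hx
        rw [if_pos hb, if_neg (by omega)]
        have := h1 x hb.1 hb.2
        omega
      · have hx : x = n - 1 := by simpa using hx
        subst hx
        rw [if_neg (by omega), if_pos rfl]
        omega
    exact (List.Subperm.perm_of_length_le hsub (by omega)).symm

-- ===== VERDICT (by name: the statement is the Claim_ definition above) =====
theorem is_authentic_collection_spec : Claim_equal_is_authentic_collection := by
  intro xs _
  unfold Spec_is_authentic_collection
  rw [Bool.eq_iff_iff, A_iff, B_iff, perm_iff_counts]
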